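-- pv_equiv track=rewrite | github.com/drizztSun/common_project | PythonLeetcode/Leetcode/444_SequenceReconstruction.py | doit_topsort
-- ===== SOURCE A (Python) =====
-- import itertools
--
-- def doit_topsort(org: list, seqs: list):
--
--     if not set(org) == set(itertools.chain(*seqs)):
--         return False
--
--     edges = {(org[i], org[i + 1]) for i in range(len(org) - 1)}
--     pos = {c: i for i, c in enumerate(org)}
--
--     for c in seqs:
--
--         for i in range(len(c) - 1):
--
--             if pos[c[i]] >= pos[c[i + 1]]:
--                 return False
--
--             # if (c[i], c[i+1]) in edges:
--             edges.discard((c[i], c[i + 1]))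
--
--     return len(edges) == 0
-- ===== SOURCE B (Python) =====
-- def doit_topsort(org: list, seqs: list):
--     # Kahn-style uniqueness verification: peel off the unique zero-indegree
--     # (source) node at each step and require it to be the next element of org.
--     if set(org) != {x for s in seqs for x in s}:
--         return False
--
--     edges = {(a, b) for s in seqs for a, b in zip(s, s[1:])}
--     remaining = set(org)
--
--     for expect in org:
--         blocked = {b for (a, b) in edges if a in remaining}
--         sources = [v for v in remaining if v not in blocked]
--         if sources != [expect]:
--             return False
--         remaining.discard(expect)
--
--     return not remaining
-- ===== Notes on version B (the rewrite author's own statement) =====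
-- stated objective: alternative
-- what changed: A checks pairwise position order against a pos dict and destructively discards matched adjacent-pair edges; B instead runs a Kahn-style unique-topological-order verification: after the same presence check it repeatedly computes the set of remaining zero-indegree (source) nodes, requires it to be exactly the next element of org, and removes it, never building a pos dict or tracking edge coverage.
import Mathlib
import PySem

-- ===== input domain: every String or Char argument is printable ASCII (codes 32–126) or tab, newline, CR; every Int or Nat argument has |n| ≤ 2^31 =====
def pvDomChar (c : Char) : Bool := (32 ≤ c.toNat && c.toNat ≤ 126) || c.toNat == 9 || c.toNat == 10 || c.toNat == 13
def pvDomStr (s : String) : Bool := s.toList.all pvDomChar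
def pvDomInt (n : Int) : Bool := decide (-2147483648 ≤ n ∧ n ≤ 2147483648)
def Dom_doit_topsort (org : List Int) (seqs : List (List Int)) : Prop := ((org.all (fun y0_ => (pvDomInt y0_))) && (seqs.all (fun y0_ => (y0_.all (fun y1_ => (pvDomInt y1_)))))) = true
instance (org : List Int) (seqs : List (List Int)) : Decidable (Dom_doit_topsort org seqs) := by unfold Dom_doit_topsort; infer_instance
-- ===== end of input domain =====

-- B replaces A's pos-dict order check + destructive edge-coverage bookkeeping by a Kahn-style
-- unique-source peeling loop (objective: alternative algorithm, no speed claim).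

-- ===== PORT A =====
-- pos = {c: i for i, c in enumerate(org)}
def pvPosDict (org : List Int) : PySem.Dict Int Int :=
  (PySem.List.enumerate org).foldl (fun d p => d.insert p.2 p.1) PySem.Dict.empty

-- inner 'for i in range(len(c) - 1)' with early 'return False' (= none).
-- pos[c[i]] cannot raise KeyError when reached: the set-equality guard has already ensured
-- every element of every seq is a key of pos, so Dict.getD _ 0 is exact here.
def pvInnerA (pos : PySem.Dict Int Int) (c : List Int) :
    List Int → PySem.Set (Int × Int) → Option (PySem.Set (Int × Int))
  | [], e => some e
  | i :: rest, e =>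
    if pos.getD (PySem.List.pyGetD c i 0) 0 ≥ pos.getD (PySem.List.pyGetD c (i + 1) 0) 0 then
      none
    else
      pvInnerA pos c rest (PySem.Set.discard e (PySem.List.pyGetD c i 0, PySem.List.pyGetD c (i + 1) 0))

def pvOuterA (pos : PySem.Dict Int Int) :
    List (List Int) → PySem.Set (Int × Int) → Option (PySem.Set (Int × Int))
  | [], e => some e
  | c :: rest, e =>
    match pvInnerA pos c (PySem.List.pyRange 0 ((c.length : Int) - 1)) e with
    | none => none
    | some e' => pvOuterA pos rest e'

def doit_topsort (org : List Int) (seqs : List (List Int)) : Bool :=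
  if !PySem.Set.equal (PySem.Set.ofList org) (PySem.Set.ofList (seqs.flatMap (fun s => s))) then
    false
  else
    let edges : PySem.Set (Int × Int) :=
      PySem.Set.ofList ((PySem.List.pyRange 0 ((org.length : Int) - 1)).map
        (fun i => (PySem.List.pyGetD org i 0, PySem.List.pyGetD org (i + 1) 0)))
    match pvOuterA (pvPosDict org) seqs edges with
    | none => false
    | some e => PySem.Set.len e == 0

-- ===== PORT B =====
-- sources = [v for v in remaining if v not in blocked]; blocked = {b for (a,b) in edges if a in remaining}
def pvSourcesB (edges : PySem.Set (Int × Int)) (rem : PySem.Set Int) : List Int :=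
  let blocked : PySem.Set Int :=
    PySem.Set.ofList ((edges.filter (fun pq => PySem.Set.contains rem pq.1)).map (fun pq => pq.2))
  rem.filter (fun v => !(PySem.Set.contains blocked v))

-- 'for expect in org: … if sources != [expect]: return False; remaining.discard(expect)'
def pvLoopB (edges : PySem.Set (Int × Int)) : List Int → PySem.Set Int → Option (PySem.Set Int)
  | [], rem => some rem
  | expect :: rest, rem =>
    if pvSourcesB edges rem = [expect] then
      pvLoopB edges rest (PySem.Set.discard rem expect)
    else none

def doit_topsort_alt (org : List Int) (seqs : List (List Int)) : Bool :=
  if PySem.Set.equal (PySem.Set.ofList org) (PySem.Set.ofList (seqs.flatMap (fun s => s))) = false then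
    false
  else
    let edges : PySem.Set (Int × Int) :=
      PySem.Set.ofList (seqs.flatMap (fun s => s.zip (s.drop 1)))
    match pvLoopB edges org (PySem.Set.ofList org) with
    | none => false
    | some rem => PySem.Set.len rem == 0   -- 'return not remaining'

-- ===== PRECONDITION & SPEC =====
def Spec_doit_topsort (org : List Int) (seqs : List (List Int)) (out : Bool) : Prop := out = doit_topsort_alt org seqs
instance (org : List Int) (seqs : List (List Int)) (out : Bool) : Decidable (Spec_doit_topsort org seqs out) := by unfold Spec_doit_topsort; infer_instance

-- ===== CLAIM (what is proved, stated in full; the proofs are below) =====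
def Claim_equal_doit_topsort : Prop := ∀ (org : List Int) (seqs : List (List Int)), Dom_doit_topsort org seqs → Spec_doit_topsort org seqs (doit_topsort org seqs)

-- ===== LEMMAS AND PROOFS =====


-- all consecutive value pairs of all seqs, in traversal order (= B's deduped edge list before ofList)
def pvPairs (seqs : List (List Int)) : List (Int × Int) :=
  seqs.flatMap (fun s => s.zip (s.drop 1))

-- remaining set after the first k peeling steps of B's loop
def pvRemK (org : List Int) (k : Nat) : PySem.Set Int :=
  (org.take k).foldl PySem.Set.discard (PySem.Set.ofList org)

-- ---------- A's loops characterised ----------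

theorem pvInnerA_go (pos : PySem.Dict Int Int) (cs : List Int) :
    ∀ (m k : Nat) (e : PySem.Set (Int × Int)), k + m + 1 = cs.length →
    pvInnerA pos cs ((List.range' k m).map (fun (j : Nat) => (j : Int))) e =
      if ((cs.drop k).zip ((cs.drop k).drop 1)).all
          (fun pq => decide (pos.getD pq.1 0 < pos.getD pq.2 0)) then
        some (((cs.drop k).zip ((cs.drop k).drop 1)).foldl PySem.Set.discard e)
      else none := by
  intro m
  induction m with
  | zero =>
    intro k e hk
    have hnil : cs.drop (k + 1) = [] := List.drop_eq_nil_of_le (by omega)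
    have hdrop : cs.drop k = cs[k]'(by omega) :: cs.drop (k + 1) := List.drop_eq_getElem_cons (by omega)
    rw [hdrop, hnil]
    simp only [List.range'_zero, List.map_nil, pvInnerA, List.drop_succ_cons, List.drop_nil,
      List.zip_nil_right, List.all_nil, List.foldl_nil, if_true]
  | succ m ih =>
    intro k e hk
    have hk1 : k < cs.length := by omega
    have hk2 : k + 1 < cs.length := by omega
    have hg1 : PySem.List.pyGetD cs ((k : Nat) : Int) 0 = cs[k]'hk1 := by
      rw [PySem.List.pyGetD_eq_getElem cs 0 (by omega) (by exact_mod_cast hk1)]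
      simp
    have hg2 : PySem.List.pyGetD cs (((k : Nat) : Int) + 1) 0 = cs[k+1]'hk2 := by
      have hcast : ((k : Nat) : Int) + 1 = (((k + 1 : Nat)) : Int) := by push_cast; ring
      rw [hcast, PySem.List.pyGetD_eq_getElem cs 0 (by omega) (by exact_mod_cast hk2)]
      simp
    have hdrop : cs.drop k = cs[k]'hk1 :: cs.drop (k + 1) := List.drop_eq_getElem_cons hk1
    have hdrop1 : cs.drop (k + 1) = cs[k+1]'hk2 :: cs.drop (k + 2) := List.drop_eq_getElem_cons hk2
    rw [List.range'_succ]
    simp only [List.map_cons, pvInnerA, hg1, hg2]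
    rw [hdrop, hdrop1]
    have hzip : (cs[k]'hk1 :: cs[k+1]'hk2 :: cs.drop (k + 2)).zip
          (List.drop 1 (cs[k]'hk1 :: cs[k+1]'hk2 :: cs.drop (k + 2)))
        = (cs[k]'hk1, cs[k+1]'hk2) :: ((cs[k+1]'hk2 :: cs.drop (k + 2)).zip (cs.drop (k + 2))) := by
      simp only [List.drop_succ_cons, List.drop_zero, List.zip_cons_cons]
    by_cases h : pos.getD (cs[k]'hk1) 0 ≥ pos.getD (cs[k+1]'hk2) 0
    · rw [if_pos h]
      have hlt : ¬ pos.getD (cs[k]'hk1) 0 < pos.getD (cs[k+1]'hk2) 0 := by omega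
      simp [hlt]
    · rw [if_neg h]
      have hlt : pos.getD (cs[k]'hk1) 0 < pos.getD (cs[k+1]'hk2) 0 := by omega
      have hrec := ih (k + 1) (PySem.Set.discard e (cs[k]'hk1, cs[k+1]'hk2)) (by omega)
      rw [hdrop1] at hrec
      simp only [List.drop_succ_cons, List.drop_zero] at hrec
      simp only [hzip, List.all_cons, List.foldl_cons, hlt, decide_true, Bool.true_and]
      exact hrec

theorem pv_pyRange_range' (n : Nat) :
    PySem.List.pyRange 0 (n : Int) 1 = (List.range' 0 n).map (fun (j : Nat) => (j : Int)) := by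
  rw [PySem.List.pyRange_one, List.range_eq_range']
  simp only [Int.sub_zero, Int.toNat_natCast, zero_add]

theorem pvInnerA_spec (pos : PySem.Dict Int Int) (c : List Int) (e : PySem.Set (Int × Int)) :
    pvInnerA pos c (PySem.List.pyRange 0 ((c.length : Int) - 1) 1) e =
      if (c.zip (c.drop 1)).all (fun pq => decide (pos.getD pq.1 0 < pos.getD pq.2 0)) then
        some ((c.zip (c.drop 1)).foldl PySem.Set.discard e)
      else none := by
  rcases c with _ | ⟨x, c'⟩
  · simp [pvInnerA]
  · have h1 : ((x :: c').length : Int) - 1 = ((c'.length : Nat) : Int) := by simp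
    rw [h1, pv_pyRange_range',
      pvInnerA_go pos (x :: c') c'.length 0 e (by simp)]
    simp

theorem pvOuterA_spec (pos : PySem.Dict Int Int) :
    ∀ (seqs : List (List Int)) (e : PySem.Set (Int × Int)),
    pvOuterA pos seqs e =
      if (pvPairs seqs).all (fun pq => decide (pos.getD pq.1 0 < pos.getD pq.2 0)) then
        some ((pvPairs seqs).foldl PySem.Set.discard e)
      else none := by
  intro seqs
  induction seqs with
  | nil => intro e; simp [pvOuterA, pvPairs]
  | cons c rest ih =>
    intro e
    have hp : pvPairs (c :: rest) = (c.zip (c.drop 1)) ++ pvPairs rest := by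
      simp [pvPairs]
    rw [pvOuterA, pvInnerA_spec, hp, List.all_append, List.foldl_append]
    by_cases h : ((c.zip (c.drop 1)).all (fun pq => decide (pos.getD pq.1 0 < pos.getD pq.2 0))) = true
    · rw [if_pos h, h, Bool.true_and]
      exact ih _
    · have h' : ((c.zip (c.drop 1)).all (fun pq => decide (pos.getD pq.1 0 < pos.getD pq.2 0))) = false := by
        simpa using h
      rw [if_neg h, h', Bool.false_and]
      simp

-- ---------- generic facts about iterated Set.discard ----------

theorem pv_mem_foldl_discard {a : Type} [BEq a] [LawfulBEq a] (x : a) :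
    ∀ (l : List a) (s : PySem.Set a),
    (x ∈ l.foldl PySem.Set.discard s) ↔ (x ∈ s ∧ x ∉ l) := by
  intro l
  induction l with
  | nil => intro s; simp
  | cons y rest ih =>
    intro s
    simp only [List.foldl_cons, ih, PySem.Set.mem_discard, List.mem_cons]
    tauto

theorem pv_nodup_foldl_discard {a : Type} [BEq a] [LawfulBEq a] :
    ∀ (l : List a) (s : PySem.Set a), s.Nodup → (l.foldl PySem.Set.discard s).Nodup := by
  intro l
  induction l with
  | nil => intro s h; exact h
  | cons y rest ih =>
    intro s h
    exact ih _ (PySem.Set.nodup_discard _ _ h)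

theorem pv_mem_remK (org : List Int) (k : Nat) (x : Int) :
    x ∈ pvRemK org k ↔ x ∈ org ∧ x ∉ org.take k := by
  unfold pvRemK
  rw [pv_mem_foldl_discard, PySem.Set.mem_ofList]

theorem pv_nodup_remK (org : List Int) (k : Nat) : (pvRemK org k).Nodup :=
  pv_nodup_foldl_discard _ _ (PySem.Set.nodup_ofList org)

-- ---------- B's sources and loop characterised ----------

theorem pv_mem_sources (E : PySem.Set (Int × Int)) (rem : PySem.Set Int) (v : Int) :
    v ∈ pvSourcesB E rem ↔ v ∈ rem ∧ ¬ ∃ u, u ∈ rem ∧ (u, v) ∈ E := by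
  unfold pvSourcesB
  rw [List.mem_filter]
  simp only [Bool.not_eq_eq_eq_not, Bool.not_true, PySem.Set.contains_eq_listContains,
    List.contains_eq_mem, decide_eq_false_iff_not, PySem.Set.mem_ofList, List.mem_map,
    List.mem_filter]
  constructor
  · rintro ⟨h1, h2⟩
    refine ⟨h1, ?_⟩
    rintro ⟨u, hu, hue⟩
    exact h2 ⟨(u, v), ⟨hue, by simpa using hu⟩, rfl⟩
  · rintro ⟨h1, h2⟩
    refine ⟨h1, ?_⟩
    rintro ⟨⟨u, w⟩, ⟨hue, hurem⟩, hw⟩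
    subst hw
    exact h2 ⟨u, by simpa using hurem, hue⟩

theorem pv_nodup_sources (E : PySem.Set (Int × Int)) (rem : PySem.Set Int) (h : rem.Nodup) :
    (pvSourcesB E rem).Nodup :=
  List.Nodup.filter _ h

theorem pv_eq_singleton (l : List Int) (hl : l.Nodup) (e : Int) (h : ∀ x, x ∈ l ↔ x = e) :
    l = [e] :=
  List.Perm.eq_singleton
    ((List.perm_ext_iff_of_nodup hl (List.nodup_singleton e)).mpr (by simpa using h))

theorem pv_loopB_isSome (E : PySem.Set (Int × Int)) :
    ∀ (l : List Int) (rem : PySem.Set Int),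
    (pvLoopB E l rem).isSome = true ↔
      ∀ (k : Nat) (h : k < l.length),
        pvSourcesB E ((l.take k).foldl PySem.Set.discard rem) = [l[k]'h] := by
  intro l
  induction l with
  | nil => intro rem; simp [pvLoopB]
  | cons e rest ih =>
    intro rem
    simp only [pvLoopB]
    by_cases h : pvSourcesB E rem = [e]
    · rw [if_pos h, ih]
      constructor
      · intro hr k hk
        cases k with
        | zero => simpa using h
        | succ k =>
          have := hr k (by simpa using Nat.lt_of_succ_lt_succ (by simpa using hk))
          simpa using this
      · intro hall k hk
        have := hall (k + 1) (by simpa using Nat.succ_lt_succ hk)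
        simpa using this
    · rw [if_neg h]
      simp only [Option.isSome_none, Bool.false_eq_true, false_iff]
      intro hall
      exact h (by simpa using hall 0 (by simp))

theorem pv_loopB_value (E : PySem.Set (Int × Int)) :
    ∀ (l : List Int) (rem r : PySem.Set Int),
    pvLoopB E l rem = some r → r = l.foldl PySem.Set.discard rem := by
  intro l
  induction l with
  | nil => intro rem r h; simpa [pvLoopB] using h.symm
  | cons e rest ih =>
    intro rem r h
    simp only [pvLoopB] at h
    by_cases hc : pvSourcesB E rem = [e]
    · rw [if_pos hc] at h
      simpa using ih _ _ h
    · rw [if_neg hc] at h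
      cases h

-- ---------- the pos dictionary ----------

theorem pvPos_append (org : List Int) (x v : Int) :
    (pvPosDict (org ++ [x])).getD v 0 =
      if v = x then (org.length : Int) else (pvPosDict org).getD v 0 := by
  unfold pvPosDict
  rw [PySem.List.enumerate_append]
  simp only [List.foldl_append, PySem.List.enumerate, List.foldl_cons, List.foldl_nil]
  by_cases h : v = x
  · subst h
    rw [PySem.Dict.getD_insert_self]
    simp
  · rw [PySem.Dict.getD_insert_of_ne _ _ _ h]
    simp [h]

theorem pvPos_spec (org : List Int) (v : Int) (hv : v ∈ org) :
    ∃ k : Nat, k < org.length ∧ (pvPosDict org).getD v 0 = (k : Int) ∧ org[k]? = some v ∧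
      ∀ j : Nat, org[j]? = some v → j ≤ k := by
  induction org using List.reverseRecOn with
  | nil => simp at hv
  | append_singleton l x ih =>
    rw [pvPos_append]
    by_cases h : v = x
    · subst h
      refine ⟨l.length, by simp, by simp, ?_, ?_⟩
      · rw [List.getElem?_append_right (le_refl _)]
        simp
      · intro j hj
        have hlt : j < (l ++ [v]).length := (List.getElem?_eq_some_iff.mp hj).1
        simp at hlt
        omega
    · rw [if_neg h]
      have hv' : v ∈ l := by
        rcases List.mem_append.mp hv with h1 | h1
        · exact h1
        · simp at h1
          exact absurd h1 h
      obtain ⟨k, hk, hpos, hget, hlast⟩ := ih hv'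
      refine ⟨k, by simp; omega, hpos, ?_, ?_⟩
      · rw [List.getElem?_append_left hk]
        exact hget
      · intro j hj
        by_cases hjl : j < l.length
        · exact hlast j (by rw [List.getElem?_append_left hjl] at hj; exact hj)
        · exfalso
          have hj2 : j < (l ++ [x]).length := (List.getElem?_eq_some_iff.mp hj).1
          simp at hj2
          have hjeq : j = l.length := by omega
          subst hjeq
          rw [List.getElem?_append_right (le_refl _)] at hj
          simp at hj
          exact h hj.symm

-- if every adjacent org pair occurs among the seq pairs and every seq pair is pos-increasing,
-- then pos is the identity on org positions (so org has no duplicates)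
theorem pv_pos_id (org : List Int) (seqs : List (List Int))
    (hgood : ∀ pq ∈ pvPairs seqs, (pvPosDict org).getD pq.1 0 < (pvPosDict org).getD pq.2 0)
    (hA : ∀ (k : Nat) (h : k + 1 < org.length),
      (org[k]'(by omega), org[k+1]'(by omega)) ∈ pvPairs seqs) :
    ∀ (k : Nat) (h : k < org.length), (pvPosDict org).getD (org[k]'(h)) 0 = (k : Int) := by
  have hmem : ∀ (k : Nat) (h : k < org.length), org[k]'h ∈ org := by
    intro k h
    exact List.getElem_mem h
  have hub : ∀ (d k : Nat) (h : k < org.length), org.length - 1 - k ≤ d →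
      (pvPosDict org).getD (org[k]'h) 0 ≤ (k : Int) := by
    intro d
    induction d with
    | zero =>
      intro k h hd
      obtain ⟨m, hm, hpos, hget, hlast⟩ := pvPos_spec org _ (hmem k h)
      rw [hpos]
      have hmk : m ≤ k := by omega
      exact_mod_cast hmk
    | succ d ihd =>
      intro k h hd
      by_cases hkd : org.length - 1 - k ≤ d
      · exact ihd k h hkd
      · have hk1 : k + 1 < org.length := by omega
        have hlt := hgood _ (hA k hk1)
        have h2 := ihd (k + 1) hk1 (by omega)
        have h3 : (pvPosDict org).getD (org[k]'h) 0 < ((k : Int) + 1) := by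
          have h4 : ((k + 1 : Nat) : Int) = (k : Int) + 1 := by push_cast; ring
          rw [← h4]
          exact lt_of_lt_of_le hlt h2
        omega
  intro k h
  obtain ⟨m, hm, hpos, hget, hlast⟩ := pvPos_spec org _ (hmem k h)
  have hlb : (k : Int) ≤ (pvPosDict org).getD (org[k]'h) 0 := by
    rw [hpos]
    exact_mod_cast hlast k (by rw [List.getElem?_eq_getElem h])
  have hub' := hub org.length k h (by omega)
  omega

theorem pv_posD_of_nodup (org : List Int) (hnd : org.Nodup) (k : Nat) (h : k < org.length) :
    (pvPosDict org).getD (org[k]'h) 0 = (k : Int) := by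
  obtain ⟨m, hm, hpos, hget, hlast⟩ := pvPos_spec org _ (List.getElem_mem h)
  have hgm : org[m]'hm = org[k]'h := by
    rw [List.getElem?_eq_getElem hm] at hget
    exact Option.some_inj.mp hget
  have hmk : m = k := (List.Nodup.getElem_inj_iff hnd).mp hgm
  subst hmk
  exact hpos

theorem pv_mem_take_iff (org : List Int) (hnd : org.Nodup) (k j : Nat) (hj : j < org.length) :
    org[j]'hj ∈ org.take k ↔ j < k := by
  rw [List.mem_take_iff_getElem]
  constructor
  · rintro ⟨i, hi, he⟩
    have hij : i = j := (List.Nodup.getElem_inj_iff hnd).mp he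
    omega
  · intro hjk
    exact ⟨j, by omega, rfl⟩

theorem pv_pair_mem_org (org : List Int) (seqs : List (List Int))
    (hg : ∀ x : Int, x ∈ org ↔ x ∈ seqs.flatMap (fun s => s)) {a b : Int}
    (h : (a, b) ∈ pvPairs seqs) : a ∈ org ∧ b ∈ org := by
  obtain ⟨s, hs, hzip⟩ := List.mem_flatMap.mp h
  have hab := List.of_mem_zip hzip
  exact ⟨(hg a).mpr (List.mem_flatMap.mpr ⟨s, hs, hab.1⟩),
    (hg b).mpr (List.mem_flatMap.mpr ⟨s, hs, List.mem_of_mem_drop hab.2⟩)⟩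

-- ---------- the heart: A's two conditions = B's unique-source condition ----------

theorem pv_step_iff (org : List Int) (seqs : List (List Int))
    (hg : ∀ x : Int, x ∈ org ↔ x ∈ seqs.flatMap (fun s => s)) :
    ((∀ pq ∈ pvPairs seqs, (pvPosDict org).getD pq.1 0 < (pvPosDict org).getD pq.2 0) ∧
     (∀ (k : Nat) (h : k + 1 < org.length), (org[k]'(by omega), org[k+1]'h) ∈ pvPairs seqs))
    ↔ (∀ (k : Nat) (h : k < org.length),
        pvSourcesB (PySem.Set.ofList (pvPairs seqs)) (pvRemK org k) = [org[k]'h]) := by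
  constructor
  · rintro ⟨hinc, hcov⟩ k hk
    have hid := pv_pos_id org seqs hinc hcov
    have hnd : org.Nodup := by
      rw [List.nodup_iff_injective_get]
      intro i j hij
      have h1 := hid i.1 i.2
      have h2 := hid j.1 j.2
      apply Fin.ext
      have : (i.1 : Int) = (j.1 : Int) := by
        rw [← h1, ← h2]
        simp only [List.get_eq_getElem] at hij
        rw [hij]
      exact_mod_cast this
    apply pv_eq_singleton _ (pv_nodup_sources _ _ (pv_nodup_remK org k))
    intro v
    rw [pv_mem_sources, pv_mem_remK]
    constructor
    · rintro ⟨⟨hvorg, hvtk⟩, hns⟩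
      obtain ⟨j, hj, rfl⟩ := List.mem_iff_getElem.mp hvorg
      have hjk : k ≤ j := by
        by_contra hlt
        exact hvtk ((pv_mem_take_iff org hnd k j hj).mpr (by omega))
      rcases Nat.eq_or_lt_of_le hjk with heq | hlt
    -- j = k: done
      · subst heq
        rfl
      · exfalso
        have hj1 : (j - 1) + 1 < org.length := by omega
        have hpair := hcov (j - 1) hj1
        apply hns
        refine ⟨org[j-1]'(by omega), ?_, ?_⟩
        · rw [pv_mem_remK]
          refine ⟨List.getElem_mem _, fun hm => ?_⟩
          have := (pv_mem_take_iff org hnd k (j - 1) (by omega)).mp hm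
          omega
        · rw [PySem.Set.mem_ofList]
          have hje : j - 1 + 1 = j := by omega
          simp only [hje] at hpair
          exact hpair
    · rintro rfl
      refine ⟨⟨List.getElem_mem _, fun hm => ?_⟩, ?_⟩
      · have := (pv_mem_take_iff org hnd k k hk).mp hm
        omega
      · rintro ⟨u, hu, hupair⟩
        rw [pv_mem_remK] at hu
        rw [PySem.Set.mem_ofList] at hupair
        obtain ⟨i, hi, rfl⟩ := List.mem_iff_getElem.mp hu.1
        have hik : k ≤ i := by
          by_contra hlt
          exact hu.2 ((pv_mem_take_iff org hnd k i hi).mpr (by omega))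
        have hlt := hinc _ hupair
        rw [hid i hi, hid k hk] at hlt
        omega
  · intro hstep
    have key : ∀ (i j : Nat) (hi : i < org.length) (hj : j < org.length),
        i < j → org[i]'hi ≠ org[j]'hj := by
      intro i j hi hj hij heq
      have hs := hstep j hj
      have hmem : org[j]'hj ∈ pvSourcesB (PySem.Set.ofList (pvPairs seqs)) (pvRemK org j) := by
        rw [hs]
        exact List.mem_singleton.mpr rfl
      rw [pv_mem_sources, pv_mem_remK] at hmem
      apply hmem.1.2
      rw [← heq]
      exact List.mem_take_iff_getElem.mpr ⟨i, by omega, rfl⟩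
    have hnd : org.Nodup := by
      rw [List.nodup_iff_injective_get]
      intro i j hij
      rcases lt_trichotomy i.1 j.1 with h | h | h
      · exact absurd (by simpa using hij) (key i.1 j.1 i.2 j.2 h)
      · exact Fin.ext h
      · exact absurd (by simpa using hij.symm) (key j.1 i.1 j.2 i.2 h)
    have hid : ∀ (k : Nat) (h : k < org.length),
        (pvPosDict org).getD (org[k]'h) 0 = (k : Int) := fun k h => pv_posD_of_nodup org hnd k h
    have hinc : ∀ pq ∈ pvPairs seqs,
        (pvPosDict org).getD pq.1 0 < (pvPosDict org).getD pq.2 0 := by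
      rintro ⟨a, b⟩ hpq
      obtain ⟨ha, hb⟩ := pv_pair_mem_org org seqs hg hpq
      obtain ⟨i, hi, rfl⟩ := List.mem_iff_getElem.mp ha
      obtain ⟨j, hj, rfl⟩ := List.mem_iff_getElem.mp hb
      rw [hid i hi, hid j hj]
      by_contra hle
      have hji : j ≤ i := by omega
      have hs := hstep j hj
      have hmem : org[j]'hj ∈ pvSourcesB (PySem.Set.ofList (pvPairs seqs)) (pvRemK org j) := by
        rw [hs]
        exact List.mem_singleton.mpr rfl
      rw [pv_mem_sources] at hmem
      apply hmem.2
      refine ⟨org[i]'hi, ?_, ?_⟩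
      · rw [pv_mem_remK]
        refine ⟨List.getElem_mem _, fun hm => ?_⟩
        have := (pv_mem_take_iff org hnd j i hi).mp hm
        omega
      · rw [PySem.Set.mem_ofList]
        exact hpq
    refine ⟨hinc, ?_⟩
    intro k hk1
    have hk : k < org.length := by omega
    have hs := hstep k hk
    have hmemrem : org[k+1]'hk1 ∈ pvRemK org k := by
      rw [pv_mem_remK]
      refine ⟨List.getElem_mem _, fun hm => ?_⟩
      have := (pv_mem_take_iff org hnd k (k + 1) hk1).mp hm
      omega
    have hne : org[k+1]'hk1 ≠ org[k]'hk := fun he => key k (k + 1) hk hk1 (by omega) he.symm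
    have hnotsrc : org[k+1]'hk1 ∉ pvSourcesB (PySem.Set.ofList (pvPairs seqs)) (pvRemK org k) := by
      rw [hs]
      simp [hne]
    rw [pv_mem_sources] at hnotsrc
    have hex : ∃ u, u ∈ pvRemK org k ∧ (u, org[k+1]'hk1) ∈ PySem.Set.ofList (pvPairs seqs) := by
      by_contra hno
      exact hnotsrc ⟨hmemrem, hno⟩
    obtain ⟨u, hu, hupair⟩ := hex
    rw [pv_mem_remK] at hu
    rw [PySem.Set.mem_ofList] at hupair
    obtain ⟨i, hi, rfl⟩ := List.mem_iff_getElem.mp hu.1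
    have hik : k ≤ i := by
      by_contra hlt
      exact hu.2 ((pv_mem_take_iff org hnd k i hi).mpr (by omega))
    have hlt := hinc _ hupair
    rw [hid i hi, hid (k + 1) hk1] at hlt
    have hieq : i = k := by omega
    subst hieq
    exact hupair

-- ---------- A and B as booleans ----------

theorem pv_A_len_iff (org : List Int) (seqs : List (List Int)) :
    (PySem.Set.len ((pvPairs seqs).foldl PySem.Set.discard
        (PySem.Set.ofList ((PySem.List.pyRange 0 ((org.length : Int) - 1) 1).map
          (fun i => (PySem.List.pyGetD org i 0, PySem.List.pyGetD org (i + 1) 0))))) == 0) = true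
    ↔ (∀ (k : Nat) (h : k + 1 < org.length), (org[k]'(by omega), org[k+1]'h) ∈ pvPairs seqs) := by
  have hlen0 : ∀ (e : PySem.Set (Int × Int)), (PySem.Set.len e == 0) = true ↔ ∀ x, x ∉ e := by
    intro e
    show ((e.length : Int) == 0) = true ↔ _
    simp [List.eq_nil_iff_forall_not_mem.symm, List.length_eq_zero_iff]
  rw [hlen0]
  constructor
  · intro hemp k hk
    by_contra hnot
    refine hemp (org[k]'(by omega), org[k+1]'(by omega)) ?_
    rw [pv_mem_foldl_discard]
    refine ⟨?_, hnot⟩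
    rw [PySem.Set.mem_ofList]
    refine List.mem_map.mpr ⟨(k : Int), ?_, ?_⟩
    · exact PySem.List.mem_pyRange_one.mpr ⟨by omega, by omega⟩
    · rw [PySem.List.pyGetD_eq_getElem org 0 (by omega) (by exact_mod_cast (by omega : k < org.length))]
      have hc : ((k : Int) + 1) = ((k + 1 : Nat) : Int) := by push_cast; ring
      rw [hc, PySem.List.pyGetD_eq_getElem org 0 (by omega) (by exact_mod_cast hk)]
      simp
  · intro hall x hx
    rw [pv_mem_foldl_discard] at hx
    obtain ⟨hxe, hxnp⟩ := hx
    rw [PySem.Set.mem_ofList] at hxe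
    obtain ⟨i, hi, rfl⟩ := List.mem_map.mp hxe
    obtain ⟨hi0, hi1⟩ := PySem.List.mem_pyRange_one.mp hi
    have hklt : i.toNat + 1 < org.length := by omega
    refine hxnp ?_
    rw [PySem.List.pyGetD_eq_getElem org 0 (by omega) (by omega)]
    have hc : i + 1 = ((i.toNat + 1 : Nat) : Int) := by omega
    rw [hc, PySem.List.pyGetD_eq_getElem org 0 (by omega) (by exact_mod_cast hklt)]
    exact hall i.toNat hklt

theorem pv_A_iff (org : List Int) (seqs : List (List Int)) :
    doit_topsort org seqs = true ↔
      (PySem.Set.equal (PySem.Set.ofList org) (PySem.Set.ofList (seqs.flatMap (fun s => s))) = true ∧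
       (∀ pq ∈ pvPairs seqs, (pvPosDict org).getD pq.1 0 < (pvPosDict org).getD pq.2 0) ∧
       (∀ (k : Nat) (h : k + 1 < org.length), (org[k]'(by omega), org[k+1]'h) ∈ pvPairs seqs)) := by
  unfold doit_topsort
  dsimp only
  by_cases hguard : PySem.Set.equal (PySem.Set.ofList org) (PySem.Set.ofList (seqs.flatMap (fun s => s))) = true
  · rw [if_neg (by intro hc; rw [hguard] at hc; simp at hc)]
    rw [pvOuterA_spec]
    by_cases hgd : ((pvPairs seqs).all
        (fun pq => decide ((pvPosDict org).getD pq.1 0 < (pvPosDict org).getD pq.2 0))) = true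
    · rw [if_pos hgd]
      rw [pv_A_len_iff]
      have hgd' : ∀ pq ∈ pvPairs seqs,
          (pvPosDict org).getD pq.1 0 < (pvPosDict org).getD pq.2 0 := by
        intro pq hpq
        simpa using List.all_eq_true.mp hgd pq hpq
      constructor
      · intro h
        exact ⟨hguard, hgd', h⟩
      · rintro ⟨_, _, h⟩
        exact h
    · rw [if_neg hgd]
      simp only [Bool.false_eq_true, false_iff]
      rintro ⟨_, hgd', _⟩
      apply hgd
      rw [List.all_eq_true]
      intro pq hpq
      simpa using hgd' pq hpq
  · rw [if_pos (by rw [Bool.eq_false_iff.mpr hguard]; rfl)]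
    simp only [Bool.false_eq_true, false_iff]
    rintro ⟨hg, _⟩
    exact hguard hg

theorem pv_B_iff (org : List Int) (seqs : List (List Int)) :
    doit_topsort_alt org seqs = true ↔
      (PySem.Set.equal (PySem.Set.ofList org) (PySem.Set.ofList (seqs.flatMap (fun s => s))) = true ∧
       (∀ (k : Nat) (h : k < org.length),
          pvSourcesB (PySem.Set.ofList (pvPairs seqs)) (pvRemK org k) = [org[k]'h])) := by
  unfold doit_topsort_alt
  dsimp only
  by_cases hguard : PySem.Set.equal (PySem.Set.ofList org) (PySem.Set.ofList (seqs.flatMap (fun s => s))) = true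
  · rw [if_neg (by intro hc; rw [hguard] at hc; cases hc)]
    have hE : PySem.Set.ofList (seqs.flatMap (fun s => s.zip (s.drop 1))) =
        PySem.Set.ofList (pvPairs seqs) := rfl
    rw [hE]
    cases hres : pvLoopB (PySem.Set.ofList (pvPairs seqs)) org (PySem.Set.ofList org) with
    | none =>
      simp only [Bool.false_eq_true, false_iff]
      rintro ⟨_, hstep⟩
      have : (pvLoopB (PySem.Set.ofList (pvPairs seqs)) org (PySem.Set.ofList org)).isSome = true := by
        rw [pv_loopB_isSome]
        intro k hk
        have := hstep k hk
        unfold pvRemK at this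
        exact this
      rw [hres] at this
      cases this
    | some r =>
      have hr := pv_loopB_value _ _ _ _ hres
      have hempty : r = [] := by
        rw [hr]
        rw [List.eq_nil_iff_forall_not_mem]
        intro x hx
        rw [pv_mem_foldl_discard, PySem.Set.mem_ofList] at hx
        exact hx.2 hx.1
      subst hempty
      constructor
      · intro _
        refine ⟨hguard, ?_⟩
        have hsome : (pvLoopB (PySem.Set.ofList (pvPairs seqs)) org (PySem.Set.ofList org)).isSome = true := by
          rw [hres]; rfl
        rw [pv_loopB_isSome] at hsome
        intro k hk
        have := hsome k hk
        unfold pvRemK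
        exact this
      · intro _
        rfl
  · rw [if_pos (Bool.eq_false_iff.mpr hguard)]
    simp only [Bool.false_eq_true, false_iff]
    rintro ⟨hg, _⟩
    exact hguard hg

-- ===== VERDICT (by name: the statement is the Claim_ definition above) =====
theorem doit_topsort_spec : Claim_equal_doit_topsort := by
  intro org seqs _
  unfold Spec_doit_topsort
  have hAB : (doit_topsort org seqs = true) ↔ (doit_topsort_alt org seqs = true) := by
    rw [pv_A_iff, pv_B_iff]
    constructor
    · rintro ⟨hguard, hinc, hcov⟩
      refine ⟨hguard, ?_⟩
      have hg : ∀ x : Int, x ∈ org ↔ x ∈ seqs.flatMap (fun s => s) := by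
        intro x
        have := (PySem.Set.equal_iff _ _).mp hguard x
        rwa [PySem.Set.mem_ofList, PySem.Set.mem_ofList] at this
      exact (pv_step_iff org seqs hg).mp ⟨hinc, hcov⟩
    · rintro ⟨hguard, hstep⟩
      have hg : ∀ x : Int, x ∈ org ↔ x ∈ seqs.flatMap (fun s => s) := by
        intro x
        have := (PySem.Set.equal_iff _ _).mp hguard x
        rwa [PySem.Set.mem_ofList, PySem.Set.mem_ofList] at this
      obtain ⟨hinc, hcov⟩ := (pv_step_iff org seqs hg).mpr hstep
      exact ⟨hguard, hinc, hcov⟩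
  cases h1 : doit_topsort org seqs <;> cases h2 : doit_topsort_alt org seqs <;> simp_all
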